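-- pv_equiv track=rewrite | github.com/AkshayAdagaleGitHub/python_practise | BusiestTimeInMall.py | find_busiest_time
-- ===== SOURCE A (Python) =====
-- from typing import List
--
-- def find_busiest_time(times: List[List[int]]) -> int:
--     n = len(times)
--     if n == 0:
--         return 0
--
--     runningCount = 0
--     maxCount = 0
--     busiestTime = 0
--     i = 0
--
--     while i < n:
--         currentTime = times[i][0]
--         if times[i][2] == 1:
--             runningCount += times[i][1]
--         else:
--             runningCount -= times[i][1]
--
--         i+=1
--         if i < n and currentTime == times[i][0]:
--             continue
--
--         if runningCount > maxCount:
--             maxCount = runningCount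
--             busiestTime = currentTime
--
--     return busiestTime
-- ===== SOURCE B (Python) =====
-- def find_busiest_time(times):
--     # pass 1: head count after each event row (prefix sums of signed deltas)
--     prefix = []
--     run = 0
--     for r in times:
--         run += r[1] if r[2] == 1 else -r[1]
--         prefix.append(run)
--     # pass 2: materialize candidates: (timestamp, count) at the last row of each
--     # run of equal consecutive timestamps
--     cands = []
--     for k in range(len(times)):
--         if k + 1 == len(times) or times[k + 1][0] != times[k][0]:
--             cands.append((times[k][0], prefix[k]))
--     # pass 3: pick the earliest candidate holding the maximum count, if positive
--     best = max((c for _, c in cands), default=0)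
--     if best <= 0:
--         return 0
--     return next(t for t, c in cands if c == best)
-- ===== Notes on version B (the rewrite author's own statement) =====
-- stated objective: alternative
-- what changed: Replaces A's online single pass that tracks runningCount/maxCount/busiestTime with look-ahead and continue by three staged passes: prefix sums of signed deltas, a materialized list of (timestamp, count) candidates at each run end, then max() plus a first-match next() to select the earliest positive maximum.
import Mathlib
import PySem

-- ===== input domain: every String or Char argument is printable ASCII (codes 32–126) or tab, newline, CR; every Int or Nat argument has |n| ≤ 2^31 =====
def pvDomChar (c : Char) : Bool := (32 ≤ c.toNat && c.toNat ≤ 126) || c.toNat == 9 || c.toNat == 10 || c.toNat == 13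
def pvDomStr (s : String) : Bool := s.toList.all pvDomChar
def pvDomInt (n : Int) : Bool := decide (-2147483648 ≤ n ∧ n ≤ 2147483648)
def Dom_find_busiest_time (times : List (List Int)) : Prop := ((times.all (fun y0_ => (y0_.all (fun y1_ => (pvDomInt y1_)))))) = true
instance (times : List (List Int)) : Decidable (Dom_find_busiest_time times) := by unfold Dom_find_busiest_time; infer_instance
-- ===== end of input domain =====

-- B replaces A's online max-tracking loop (runningCount/maxCount/busiestTime updated
-- with look-ahead and continue) by three staged passes: prefix sums, a materialized
-- candidate list (count at each run end), then max + first-match selection.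

-- ===== PORT A =====

-- times[i][k]; Pre_ guarantees the index is in range, so the default is never taken there
def pvRow (r : List Int) (k : Int) : Int := (PySem.List.pyGet? r k).getD 0

-- `i < n and currentTime == times[i][0]` (look-ahead at the next row)
def pvSameHead (t : Int) : List (List Int) → Bool
  | r :: _ => pvRow r 0 == t
  | [] => false

-- A's while loop: the list is the remaining suffix times[i:]
def findA : List (List Int) → Int → Int → Int → Int
  | [], _, _, busiestTime => busiestTime
  | r :: rest, runningCount, maxCount, busiestTime =>
      let currentTime := pvRow r 0
      let running' := if pvRow r 2 = 1 then runningCount + pvRow r 1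
                      else runningCount - pvRow r 1
      if pvSameHead currentTime rest then
        findA rest running' maxCount busiestTime
      else if running' > maxCount then
        findA rest running' running' currentTime
      else
        findA rest running' maxCount busiestTime

def find_busiest_time (times : List (List Int)) : Int :=
  if times.length = 0 then 0 else findA times 0 0 0

-- ===== PORT B =====

-- signed delta of one row: r[1] if r[2] == 1 else -r[1]
def pvDelta (r : List Int) : Int := if pvRow r 2 = 1 then pvRow r 1 else -(pvRow r 1)

-- pass 1: `prefix`, built by the loop carrying `run` (list recursion = the same loop)
def pvPrefix : List (List Int) → Int → List Int
  | [], _ => []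
  | r :: rest, run =>
      let run' := run + pvDelta r
      run' :: pvPrefix rest run'

-- pass 2: the index loop over range(len(times)), transcribed as lockstep recursion on
-- times and prefix (same iterations: position k keeps (times[k][0], prefix[k]) iff
-- k+1 == len(times) or times[k+1][0] != times[k][0])
def pvCands : List (List Int) → List Int → List (Int × Int)
  | r :: rest, c :: cs =>
      if pvSameHead (pvRow r 0) rest then pvCands rest cs
      else (pvRow r 0, c) :: pvCands rest cs
  | _, _ => []

-- pass 3 helpers: max(..., default=0) and next(...) (the generator never exhausts
-- when best > 0, so the 0 default of find? is never taken)
def pvBest (cands : List (Int × Int)) : Int :=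
  (PySem.List.max? (cands.map Prod.snd) (fun x => x)).getD 0

def pvFirst (cands : List (Int × Int)) (m : Int) : Int :=
  match cands.find? (fun p => p.2 == m) with
  | some p => p.1
  | none => 0

def find_busiest_time_alt (times : List (List Int)) : Int :=
  let pref := pvPrefix times 0
  let cands := pvCands times pref
  let best := pvBest cands
  if best ≤ 0 then 0 else pvFirst cands best

-- ===== PRECONDITION & SPEC =====
-- Pre_ excludes rows with fewer than 3 entries, on which both Pythons raise IndexError.
def Pre_find_busiest_time (times : List (List Int)) : Prop :=
  ∀ r ∈ times, 3 ≤ r.length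
instance (times : List (List Int)) : Decidable (Pre_find_busiest_time times) := by
  unfold Pre_find_busiest_time; infer_instance

def pvWitness_find_busiest_time : List (List Int) :=
  [[1, 2, 1], [1, 1, 0], [2, 5, 1]]

def Spec_find_busiest_time (times : List (List Int)) (out : Int) : Prop := out = find_busiest_time_alt times
instance (times : List (List Int)) (out : Int) : Decidable (Spec_find_busiest_time times out) := by unfold Spec_find_busiest_time; infer_instance

-- ===== CLAIM (what is proved, stated in full; the proofs are below) =====
def Claim_equal_find_busiest_time : Prop := ∀ (times : List (List Int)), Dom_find_busiest_time times → Pre_find_busiest_time times → Spec_find_busiest_time times (find_busiest_time times)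

-- ===== LEMMAS AND PROOFS =====

-- B's staged result, as a function of the carried state, for the induction
def pvStaged (cs : List (Int × Int)) (maxC b : Int) : Int :=
  match PySem.List.max? (cs.map Prod.snd) (fun x => x) with
  | none => b
  | some m => if maxC < m then pvFirst cs m else b

theorem foldl_max_pull (t : List Int) : ∀ (a x : Int),
    t.foldl max (max a x) = max a (t.foldl max x) := by
  induction t with
  | nil => intro a x; simp
  | cons c t ih =>
      intro a x
      simp only [List.foldl_cons]
      rw [show max (max a x) c = max a (max x c) by omega, ih]

theorem max?_id_cons' (x : Int) (t : List Int) :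
    PySem.List.max? (x :: t) (fun y => y) = some (t.foldl max x) := by
  exact PySem.List.max?_id_cons x t

-- one step of the staged characterization, at a run boundary
theorem pvStaged_cons (t c : Int) (cs : List (Int × Int)) (maxC b : Int) :
    pvStaged ((t, c) :: cs) maxC b =
      (if c > maxC then pvStaged cs c t else pvStaged cs maxC b) := by
  unfold pvStaged pvFirst
  cases hcs : cs.map Prod.snd with
  | nil =>
      have hnil : cs = [] := List.map_eq_nil_iff.mp hcs
      subst hnil
      simp only [List.map_cons, List.map_nil, max?_id_cons', List.foldl_nil,
        PySem.List.max?]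
      rcases lt_or_ge maxC c with h | h
      · simp [h, List.find?_cons, show (c == c) = true by simp]
      · simp [not_lt.mpr h, show ¬ c > maxC by omega]
  | cons m' t' =>
      have hm' : PySem.List.max? (cs.map Prod.snd) (fun y => y)
          = some (t'.foldl max m') := by
        rw [hcs]; exact max?_id_cons' m' t'
      simp only [List.map_cons, hcs, max?_id_cons', List.foldl_cons, hm']
      rw [foldl_max_pull t' c m']
      generalize List.foldl max m' t' = M
      by_cases h1 : c > maxC
      · by_cases h2 : c < M
        · have hmx : max c M = M := by omega
          have hne : (c == M) = false := by simp; omega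
          rw [hmx]
          simp [show maxC < M by omega, h1, h2, List.find?_cons, hne]
        · have hmx : max c M = c := by omega
          rw [hmx]
          simp [h1, show ¬ c < M from h2, List.find?_cons]
      · by_cases h2 : maxC < M
        · have hmx : max c M = M := by omega
          have hne : (c == M) = false := by simp; omega
          rw [hmx]
          simp [h1, h2, List.find?_cons, hne]
        · have hle : ¬ maxC < max c M := by omega
          simp [h1, h2, hle]

-- A's loop computes B's staged selection over the candidate list
theorem findA_staged : ∀ (xs : List (List Int)) (run maxC b : Int),
    findA xs run maxC b = pvStaged (pvCands xs (pvPrefix xs run)) maxC b := by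
  intro xs
  induction xs with
  | nil =>
      intro run maxC b
      simp [findA, pvCands, pvPrefix, pvStaged, PySem.List.max?]
  | cons r rest ih =>
      intro run maxC b
      have hrun : (if pvRow r 2 = 1 then run + pvRow r 1 else run - pvRow r 1)
          = run + pvDelta r := by
        unfold pvDelta; split <;> omega
      by_cases hs : pvSameHead (pvRow r 0) rest = true
      · simp only [findA, hrun, hs, if_true, pvPrefix, pvCands]
        exact ih (run + pvDelta r) maxC b
      · have hs' : pvSameHead (pvRow r 0) rest = false := by
          revert hs; cases pvSameHead (pvRow r 0) rest <;> simp
        simp only [findA, hrun, hs', Bool.false_eq_true, if_false, pvPrefix, pvCands]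
        rw [pvStaged_cons]
        split
        · exact ih (run + pvDelta r) _ _
        · exact ih (run + pvDelta r) maxC b

-- ===== VERDICT (by name: the statement is the Claim_ definition above) =====
theorem find_busiest_time_spec : Claim_equal_find_busiest_time := by
  intro times _ _
  unfold Spec_find_busiest_time find_busiest_time find_busiest_time_alt pvBest
  cases times with
  | nil =>
      have hnone : PySem.List.max? ([] : List Int) (fun x => x) = none :=
        (PySem.List.max?_eq_none_iff _ _).mpr rfl
      simp [pvCands, hnone]
  | cons r rest =>
      simp only [List.length_cons, Nat.succ_ne_zero, if_false]
      rw [findA_staged]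
      unfold pvStaged
      cases hm : PySem.List.max? ((pvCands (r :: rest) (pvPrefix (r :: rest) 0)).map Prod.snd) (fun x => x) with
      | none => simp [hm]
      | some m =>
          simp only [hm, Option.getD_some]
          by_cases h : (0:Int) < m
          · simp [h, not_le.mpr h]
          · simp [show ¬ (0:Int) < m from h, not_lt.mp h]
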